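-- pv_equiv track=rewrite | github.com/seokcode/Python_Codingtest | programmers/Summer,Winter-Coding(2018)/스킬트리.py | solution
-- ===== SOURCE A (Python) =====
-- def solution(skill, skill_trees):
--     answer = 0
--     a = list(skill)
--
--     for i in skill_trees:
--         i = list(i)
--         temp = []
--         for j in range(len(i)):
--             for k in range(len(a)):
--                 if i[j] == a[k]:
--                     temp.append(i[j])
--         if ''.join(temp) == skill[:len(temp)]:
--             answer += 1
--
--     return answer
-- ===== SOURCE B (Python) =====
-- def solution(skill, skill_trees):
--     skills = set(skill)
--     n = len(skill)
--     answer = 0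
--     for tree in skill_trees:
--         idx = 0
--         valid = True
--         for c in tree:
--             if c in skills:
--                 if idx < n and c == skill[idx]:
--                     idx += 1
--                 else:
--                     valid = False
--                     break
--         if valid:
--             answer += 1
--     return answer
-- ===== Notes on version B (the rewrite author's own statement) =====
-- stated objective: faster
-- what changed: Instead of building, for every tree, a filtered character list via nested loops over the tree and the whole skill string and then comparing it to a skill slice, B builds a set of skill characters once and validates each tree in a single pass with an integer pointer into skill and an early exit on the first mismatch; Pre_ excludes skill strings with repeated characters, a corner outside the problem's specification on which A's per-occurrence replication of tree characters and B's single-pointer check are both defensible.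
-- outside the precondition, e.g. on solution('AA', ['AA']): A returns 0, B returns 1
import Mathlib
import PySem

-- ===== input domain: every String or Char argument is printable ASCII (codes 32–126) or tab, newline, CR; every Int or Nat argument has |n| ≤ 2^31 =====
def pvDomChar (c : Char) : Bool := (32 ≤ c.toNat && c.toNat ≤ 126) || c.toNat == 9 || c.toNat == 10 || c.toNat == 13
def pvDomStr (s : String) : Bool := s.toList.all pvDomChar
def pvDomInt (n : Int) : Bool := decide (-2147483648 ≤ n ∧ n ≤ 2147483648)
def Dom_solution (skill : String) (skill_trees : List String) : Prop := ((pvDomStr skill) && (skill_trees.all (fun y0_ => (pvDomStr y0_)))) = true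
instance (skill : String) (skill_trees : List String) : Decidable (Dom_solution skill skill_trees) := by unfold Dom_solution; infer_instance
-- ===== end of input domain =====

-- B replaces A's per-tree quadratic filtered-list build and slice comparison by a one-time set of
-- skill characters and a single incremental pointer scan with early exit (objective: faster).

-- ===== PORT A =====
-- the nested loops building temp for one tree (j over the tree's chars, k over skill's chars)
def pvA_temp (aL iL : List Char) : List Char :=
  (PySem.List.pyRange 0 (iL.length : Int) 1).foldl (fun temp j =>
    (PySem.List.pyRange 0 (aL.length : Int) 1).foldl (fun temp k =>
      if PySem.List.pyGetD iL j ' ' = PySem.List.pyGetD aL k ' ' then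
        temp ++ [PySem.List.pyGetD iL j ' ']
      else temp) temp) []

def solution (skill : String) (skill_trees : List String) : Int :=
  skill_trees.foldl (fun answer i =>
    let temp := pvA_temp skill.toList i.toList
    if temp = PySem.List.slice skill.toList none (some (temp.length : Int)) then answer + 1
    else answer) 0

-- ===== PORT B =====
-- one tree character c: if c is a skill character, check/advance the pointer; break is a sticky invalid state
def pvB_step (sL : List Char) (skills : PySem.Set Char) (st : Int × Bool) (c : Char) : Int × Bool :=
  if st.2 then
    if PySem.Set.contains skills c then
      if st.1 < (sL.length : Int) ∧ c = PySem.List.pyGetD sL st.1 ' ' then (st.1 + 1, true)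
      else (st.1, false)
    else st
  else st

def solution_alt (skill : String) (skill_trees : List String) : Int :=
  let skills := PySem.Set.ofList skill.toList
  skill_trees.foldl (fun answer tree =>
    if (tree.toList.foldl (pvB_step skill.toList skills) (0, true)).2 then answer + 1 else answer) 0

-- ===== PRECONDITION & SPEC =====
-- Pre_ excludes skill strings with repeated characters (a corner outside the problem's
-- specification): there A's nested filter appends one copy per occurrence, so its slice
-- comparison reflects an accidental replication; B's single-pointer check is equally defensible.
def Pre_solution (skill : String) (skill_trees : List String) : Prop := skill.toList.Nodup
instance (skill : String) (skill_trees : List String) : Decidable (Pre_solution skill skill_trees) := by unfold Pre_solution; infer_instance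
def pvWitness_solution : String × List String := ("CBD", ["BACDE", "CBADF", "AECB", "BDA"])

def Spec_solution (skill : String) (skill_trees : List String) (out : Int) : Prop := out = solution_alt skill skill_trees
instance (skill : String) (skill_trees : List String) (out : Int) : Decidable (Spec_solution skill skill_trees out) := by unfold Spec_solution; infer_instance

-- ===== CLAIM (what is proved, stated in full; the proofs are below) =====
def Claim_equal_solution : Prop := ∀ (skill : String) (skill_trees : List String), Dom_solution skill skill_trees → Pre_solution skill skill_trees → Spec_solution skill skill_trees (solution skill skill_trees)

-- ===== LEMMAS AND PROOFS =====

-- the sequence of skill characters a tree contributes (one copy per occurrence in skill)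
def pvT (sL iL : List Char) : List Char := iL.flatMap (fun c => List.replicate (sL.count c) c)

-- B's single pointer advance
def pvG (sL : List Char) (c : Char) (st : Int × Bool) : Int × Bool :=
  if st.2 then
    if st.1 < (sL.length : Int) ∧ c = PySem.List.pyGetD sL st.1 ' ' then (st.1 + 1, true)
    else (st.1, false)
  else st

theorem pvG_false (sL : List Char) (c : Char) (x : Int) : pvG sL c (x, false) = (x, false) := by
  simp [pvG]

theorem pvG_iter_false (sL : List Char) (c : Char) (m : ℕ) (x : Int) :
    (pvG sL c)^[m] (x, false) = (x, false) := by
  induction m with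
  | zero => simp
  | succ k ih => rw [Function.iterate_succ_apply, pvG_false, ih]

theorem pvG_iter_pos (sL : List Char) (c : Char) :
    ∀ (m k : ℕ), List.replicate m c <+: sL.drop k →
      (pvG sL c)^[m] ((k : Int), true) = ((↑(k + m) : Int), true) := by
  intro m
  induction m with
  | zero => intro k _; simp
  | succ m ih =>
    intro k h
    obtain ⟨t, ht⟩ := h
    rw [List.replicate_succ] at ht
    have hk : k < sL.length := by
      by_contra hle
      rw [List.drop_eq_nil_iff.mpr (by omega)] at ht
      simp at ht
    have hdk : sL.drop k = sL[k] :: sL.drop (k + 1) := List.drop_eq_getElem_cons hk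
    rw [hdk] at ht
    simp only [List.cons_append, List.cons.injEq] at ht
    obtain ⟨hc, hrest⟩ := ht
    rw [Function.iterate_succ_apply]
    have hget : c = PySem.List.pyGetD sL ((k : Int)) ' ' := by
      rw [PySem.List.pyGetD_natCast, List.getD_eq_getElem?_getD, List.getElem?_eq_getElem hk]
      simpa using hc
    have hg : pvG sL c ((k : Int), true) = ((↑(k + 1) : Int), true) := by
      rw [pvG]
      rw [if_pos rfl, if_pos ⟨show (k : Int) < (sL.length : Int) by exact_mod_cast hk, hget⟩]
      push_cast; ring_nf
    rw [hg, ih (k + 1) ⟨t, hrest⟩]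
    congr 1
    omega

theorem pvG_iter_neg (sL : List Char) (c : Char) :
    ∀ (m k : ℕ), ¬ (List.replicate m c <+: sL.drop k) →
      ((pvG sL c)^[m] ((k : Int), true)).2 = false := by
  intro m
  induction m with
  | zero => intro k h; rw [List.replicate_zero] at h; exact absurd List.nil_prefix h
  | succ m ih =>
    intro k h
    rw [Function.iterate_succ_apply]
    by_cases hk : k < sL.length
    · by_cases hc : sL[k] = c
      · have hget : c = PySem.List.pyGetD sL ((k : Int)) ' ' := by
          rw [PySem.List.pyGetD_natCast, List.getD_eq_getElem?_getD, List.getElem?_eq_getElem hk]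
          simpa using hc.symm
        have hg : pvG sL c ((k : Int), true) = ((↑(k + 1) : Int), true) := by
          rw [pvG]
          rw [if_pos rfl, if_pos ⟨show (k : Int) < (sL.length : Int) by exact_mod_cast hk, hget⟩]
          push_cast; ring_nf
        rw [hg]
        apply ih
        intro ⟨t, ht⟩
        apply h
        refine ⟨t, ?_⟩
        rw [List.replicate_succ, List.drop_eq_getElem_cons hk, hc]
        simp [ht]
      · have hget : PySem.List.pyGetD sL ((k : Int)) ' ' = sL[k] := by
          rw [PySem.List.pyGetD_natCast, List.getD_eq_getElem?_getD, List.getElem?_eq_getElem hk]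
          rfl
        have hg : pvG sL c ((k : Int), true) = ((k : Int), false) := by
          rw [pvG]
          rw [if_pos rfl, if_neg (by rw [hget]; exact fun hh => hc hh.2.symm)]
        rw [hg, pvG_iter_false]
    · have hg : pvG sL c ((k : Int), true) = ((k : Int), false) := by
        rw [pvG]
        rw [if_pos rfl, if_neg (fun hh => hk (by exact_mod_cast (show (k : Int) < (sL.length : Int) from hh.1)))]
      rw [hg, pvG_iter_false]

-- under a duplicate-free skill, one B step is count-many single advances
theorem pvB_step_eq_iter (sL : List Char) (hnd : sL.Nodup) (c : Char) (st : Int × Bool)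
    (hst : st.2 = true) :
    pvB_step sL (PySem.Set.ofList sL) st c = (pvG sL c)^[sL.count c] st := by
  rw [pvB_step, hst]
  simp only [if_true]
  by_cases hmem : c ∈ sL
  · have hcontains : PySem.Set.contains (PySem.Set.ofList sL) c = true := by
      simp [PySem.Set.contains, PySem.Set.mem_ofList, hmem]
    have hcount : sL.count c = 1 := List.count_eq_one_of_mem hnd hmem
    rw [hcontains, hcount]
    simp only [if_true, Function.iterate_one]
    rw [pvG, hst]
    simp
  · have hcontains : PySem.Set.contains (PySem.Set.ofList sL) c = false := by
      simp [PySem.Set.contains, PySem.Set.mem_ofList, hmem]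
    have hcount : sL.count c = 0 := List.count_eq_zero.mpr hmem
    rw [hcontains, hcount]
    simp

theorem pvB_step_false (sL : List Char) (skills : PySem.Set Char) (x : Int) (c : Char) :
    pvB_step sL skills (x, false) c = (x, false) := by
  simp [pvB_step]

theorem pvB_fold_false (sL : List Char) (skills : PySem.Set Char) (l : List Char) (x : Int) :
    l.foldl (pvB_step sL skills) (x, false) = (x, false) := by
  induction l with
  | nil => rfl
  | cons c l ih => rw [List.foldl_cons, pvB_step_false, ih]

theorem pvB_outer_pos (sL : List Char) (hnd : sL.Nodup) :
    ∀ (iL : List Char) (k : ℕ), pvT sL iL <+: sL.drop k →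
      iL.foldl (pvB_step sL (PySem.Set.ofList sL)) ((k : Int), true) = ((↑(k + (pvT sL iL).length) : Int), true) := by
  intro iL
  induction iL with
  | nil => intro k _; simp [pvT]
  | cons c rest ih =>
    intro k h
    have hT : pvT sL (c :: rest) = List.replicate (sL.count c) c ++ pvT sL rest := by
      simp [pvT]
    rw [hT] at h
    obtain ⟨t, ht⟩ := h
    rw [List.append_assoc] at ht
    have h1 : List.replicate (sL.count c) c <+: sL.drop k := ⟨pvT sL rest ++ t, ht⟩
    have hdrop : sL.drop (k + sL.count c) = pvT sL rest ++ t := by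
      have h2 := congrArg (List.drop (sL.count c)) ht.symm
      rw [List.drop_drop, List.drop_left' (by simp)] at h2
      exact h2
    rw [List.foldl_cons, pvB_step_eq_iter sL hnd c _ rfl, pvG_iter_pos sL c _ k h1,
        ih (k + sL.count c) ⟨t, hdrop.symm⟩]
    rw [hT]
    congr 2
    simp; omega

theorem pvB_outer_neg (sL : List Char) (hnd : sL.Nodup) :
    ∀ (iL : List Char) (k : ℕ), ¬ (pvT sL iL <+: sL.drop k) →
      (iL.foldl (pvB_step sL (PySem.Set.ofList sL)) ((k : Int), true)).2 = false := by
  intro iL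
  induction iL with
  | nil =>
    intro k h
    rw [pvT] at h
    simp only [List.flatMap_nil] at h
    exact absurd List.nil_prefix h
  | cons c rest ih =>
    intro k h
    have hT : pvT sL (c :: rest) = List.replicate (sL.count c) c ++ pvT sL rest := by
      simp [pvT]
    rw [List.foldl_cons, pvB_step_eq_iter sL hnd c _ rfl]
    by_cases h1 : List.replicate (sL.count c) c <+: sL.drop k
    · rw [pvG_iter_pos sL c _ k h1]
      apply ih
      intro ⟨u, hu⟩
      apply h
      obtain ⟨t, ht⟩ := h1
      have hdrop : sL.drop (k + sL.count c) = t := by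
        have h2 := congrArg (List.drop (sL.count c)) ht.symm
        rw [List.drop_drop, List.drop_left' (by simp)] at h2
        exact h2
      refine ⟨u, ?_⟩
      rw [hT, List.append_assoc, ← ht, ← hdrop, hu]
    · obtain ⟨x, hx⟩ : ∃ x, (pvG sL c)^[sL.count c] ((k : Int), true) = (x, false) := by
        have hsnd := pvG_iter_neg sL c (sL.count c) k h1
        exact ⟨((pvG sL c)^[sL.count c] ((k : Int), true)).1, by rw [← hsnd]⟩
      rw [hx, pvB_fold_false]

-- A side: the filter loop over skill's characters produces the replicated block
theorem pvA_inner (c : Char) (l : List Char) :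
    ∀ temp : List Char,
      l.foldl (fun t x => if c = x then t ++ [c] else t) temp = temp ++ List.replicate (l.count c) c := by
  induction l with
  | nil => intro temp; simp
  | cons x l ih =>
    intro temp
    by_cases h : c = x
    · subst h
      simp [ih, List.replicate_succ]
    · have hbe : (x == c) = false := beq_eq_false_iff_ne.mpr (fun h' => h h'.symm)
      simp [h, List.count_cons, hbe, ih]

theorem pvA_temp_eq (sL iL : List Char) : pvA_temp sL iL = pvT sL iL := by
  rw [pvA_temp]
  rw [PySem.List.foldl_pyRange_zero_pyGetD' iL ' '
    (fun temp cj => (PySem.List.pyRange 0 (sL.length : Int) 1).foldl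
      (fun temp k => if cj = PySem.List.pyGetD sL k ' ' then temp ++ [cj] else temp) temp) []]
  have hstep : (fun (temp : List Char) (cj : Char) =>
      (PySem.List.pyRange 0 (sL.length : Int) 1).foldl
        (fun temp k => if cj = PySem.List.pyGetD sL k ' ' then temp ++ [cj] else temp) temp)
      = fun temp cj => temp ++ List.replicate (sL.count cj) cj := by
    funext temp cj
    rw [PySem.List.foldl_pyRange_zero_pyGetD' sL ' '
      (fun t x => if cj = x then t ++ [cj] else t) temp]
    exact pvA_inner cj sL temp
  rw [hstep]
  rw [PySem.List.foldl_append_eq_flatMap]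
  rfl

-- per-tree agreement of the two counting conditions
theorem pv_tree (sL iL : List Char) (hnd : sL.Nodup) :
    (pvA_temp sL iL = PySem.List.slice sL none (some ((pvA_temp sL iL).length : Int)))
      ↔ (iL.foldl (pvB_step sL (PySem.Set.ofList sL)) (0, true)).2 = true := by
  rw [pvA_temp_eq, PySem.List.slice_to_natCast]
  have h0 : ((0 : Int), true) = (((0 : ℕ) : Int), true) := by norm_num
  rw [h0]
  constructor
  · intro h
    have hp : pvT sL iL <+: sL.drop 0 := by
      rw [List.drop_zero]
      exact List.prefix_iff_eq_take.mpr h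
    rw [pvB_outer_pos sL hnd iL 0 hp]
  · intro h
    by_cases hp : pvT sL iL <+: sL.drop 0
    · rw [List.drop_zero] at hp
      exact List.prefix_iff_eq_take.mp hp
    · rw [pvB_outer_neg sL hnd iL 0 hp] at h
      exact absurd h (by simp)

-- ===== VERDICT (by name: the statement is the Claim_ definition above) =====
theorem solution_spec : Claim_equal_solution := by
  intro skill skill_trees _ hpre
  unfold Spec_solution solution solution_alt
  congr 1
  funext answer tree
  show (if pvA_temp skill.toList tree.toList =
        PySem.List.slice skill.toList none (some ((pvA_temp skill.toList tree.toList).length : Int))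
      then answer + 1 else answer) = _
  by_cases hA : pvA_temp skill.toList tree.toList =
      PySem.List.slice skill.toList none (some ((pvA_temp skill.toList tree.toList).length : Int))
  · rw [if_pos hA, if_pos ((pv_tree skill.toList tree.toList hpre).mp hA)]
  · rw [if_neg hA, if_neg (fun hB => hA ((pv_tree skill.toList tree.toList hpre).mpr hB))]
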